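-- pv_equiv track=rewrite | github.com/mytnguyen26/wumpus-world | wumpus/utility.py | find_pos_from_adj_cells
-- ===== SOURCE A (Python) =====
-- from typing import Tuple
--
-- def find_pos_from_adj_cells(adj_cells) -> Tuple[int, int]:
--     col_freq_count = {}
--     row_freq_count = {}
--
--     for pos in adj_cells:
--         if pos[0] not in row_freq_count.keys():
--             row_freq_count[pos[0]] = 1
--         else:
--             row_freq_count[pos[0]] += 1
--
--         if pos[1] not in col_freq_count.keys():
--             col_freq_count[pos[1]] = 1
--         else:
--             col_freq_count[pos[1]] += 1
--
--     col = max(col_freq_count, key=col_freq_count.get)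
--     row = max(row_freq_count, key=row_freq_count.get)
--     return (row, col)
-- ===== SOURCE B (Python) =====
-- def _mode(xs):
--     # successive-filtering mode: process distinct values in first-occurrence order,
--     # counting each and dropping all its copies; strict '>' keeps the earliest winner
--     best = xs[0]
--     best_count = xs.count(best)
--     rest = [x for x in xs if x != best]
--     while rest:
--         v = rest[0]
--         c = rest.count(v)
--         if c > best_count:
--             best, best_count = v, c
--         rest = [x for x in rest if x != v]
--     return best
--
--
-- def find_pos_from_adj_cells(adj_cells):
--     rows = [p[0] for p in adj_cells]
--     cols = [p[1] for p in adj_cells]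
--     return (_mode(rows), _mode(cols))
-- ===== Notes on version B (the rewrite author's own statement) =====
-- stated objective: alternative
-- what changed: Replaces the single-pass row/column frequency dicts and dict-argmax with an iterative successive-filtering mode: repeatedly take the first remaining value, count its copies, filter them all out, and keep the strict-greater best, which preserves the first-occurrence tie-break without any dictionary.
import Mathlib
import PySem

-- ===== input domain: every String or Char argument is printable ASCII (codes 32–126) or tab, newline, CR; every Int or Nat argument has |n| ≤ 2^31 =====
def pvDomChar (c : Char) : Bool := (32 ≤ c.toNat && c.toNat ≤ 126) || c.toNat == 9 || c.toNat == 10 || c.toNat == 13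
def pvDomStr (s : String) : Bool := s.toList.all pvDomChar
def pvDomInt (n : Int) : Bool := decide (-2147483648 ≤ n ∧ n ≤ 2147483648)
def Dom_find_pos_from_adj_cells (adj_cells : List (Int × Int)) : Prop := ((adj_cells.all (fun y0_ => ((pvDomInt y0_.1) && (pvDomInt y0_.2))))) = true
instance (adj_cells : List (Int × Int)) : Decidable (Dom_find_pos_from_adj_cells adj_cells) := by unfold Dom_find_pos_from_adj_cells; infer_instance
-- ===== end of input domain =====

-- B replaces A's dict frequency tables + dict argmax with a successive-filtering mode
-- (repeatedly count and filter out the first remaining value, keeping the strict best):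
-- an alternative algorithm, not claimed faster.

-- ===== PORT A =====
-- the loop body: both dicts updated per position; dict.get as max key = getD (keys are present)
def find_pos_from_adj_cells (adj_cells : List (Int × Int)) : Int × Int :=
  let dicts := adj_cells.foldl
    (fun (st : PySem.Dict Int Int × PySem.Dict Int Int) pos =>
      ((if st.1.contains pos.1 = false then st.1.insert pos.1 1
        else st.1.insert pos.1 (st.1.getD pos.1 0 + 1)),
       (if st.2.contains pos.2 = false then st.2.insert pos.2 1
        else st.2.insert pos.2 (st.2.getD pos.2 0 + 1))))
    (PySem.Dict.empty, PySem.Dict.empty)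
  -- max(d, key=d.get); on an empty dict Python raises ValueError (excluded by Pre_) — .getD 0 is a placeholder there
  let col := (PySem.List.max? dicts.2.keys (fun k => dicts.2.getD k 0)).getD 0
  let row := (PySem.List.max? dicts.1.keys (fun k => dicts.1.getD k 0)).getD 0
  (row, col)

-- ===== PORT B =====
-- the while loop of Source B's _mode: state (best, best_count, rest)
def modeLoop (best : Int) (bestCount : Int) (rest : List Int) : Int :=
  match rest with
  | [] => best
  | v :: t =>
      let c : Int := ((v :: t).count v : Int)
      let bb := if bestCount < c then (v, c) else (best, bestCount)
      modeLoop bb.1 bb.2 ((v :: t).filter (· != v))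
termination_by rest.length
decreasing_by
  simp only [List.filter_cons, bne_self_eq_false, Bool.false_eq_true, if_false, List.length_cons]
  exact Nat.lt_succ_of_le (List.length_filter_le _ _)

-- _mode: xs[0] raises IndexError on [] (excluded by Pre_) — 0 is a placeholder there
def pyMode (xs : List Int) : Int :=
  match xs with
  | [] => 0
  | x :: _ => modeLoop x ((xs.count x : Nat) : Int) (xs.filter (· != x))

def find_pos_from_adj_cells_alt (adj_cells : List (Int × Int)) : Int × Int :=
  let rows := adj_cells.map (fun p => p.1)
  let cols := adj_cells.map (fun p => p.2)
  (pyMode rows, pyMode cols)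

-- ===== PRECONDITION & SPEC =====
-- Pre_ excludes only the empty list, on which both A (max of empty dict, ValueError) and B (xs[0], IndexError) raise
def Pre_find_pos_from_adj_cells (adj_cells : List (Int × Int)) : Prop := adj_cells ≠ []
instance (adj_cells : List (Int × Int)) : Decidable (Pre_find_pos_from_adj_cells adj_cells) := by unfold Pre_find_pos_from_adj_cells; infer_instance
def pvWitness_find_pos_from_adj_cells : (List (Int × Int)) := [(0, 1), (2, 1)]

def Spec_find_pos_from_adj_cells (adj_cells : List (Int × Int)) (out : Int × Int) : Prop := out = find_pos_from_adj_cells_alt adj_cells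
instance (adj_cells : List (Int × Int)) (out : Int × Int) : Decidable (Spec_find_pos_from_adj_cells adj_cells out) := by unfold Spec_find_pos_from_adj_cells; infer_instance

-- ===== CLAIM (what is proved, stated in full; the proofs are below) =====
def Claim_equal_find_pos_from_adj_cells : Prop := ∀ (adj_cells : List (Int × Int)), Dom_find_pos_from_adj_cells adj_cells → Pre_find_pos_from_adj_cells adj_cells → Spec_find_pos_from_adj_cells adj_cells (find_pos_from_adj_cells adj_cells)

-- ===== LEMMAS AND PROOFS =====

-- the fold step of Python's max(xs, key=…) (proof-side name for PySem.List.max?'s step)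
def maxStep {α : Type} (key : α → Int) : Option α → α → Option α :=
  fun acc x =>
    match acc with
    | none => some x
    | some m => if key m < key x then some x else some m

-- the same step on an always-present accumulator ("first strict argmax")
def combine {α : Type} (key : α → Int) (a b : α) : α :=
  if key a < key b then b else a

theorem max?_eq_foldl_maxStep {α : Type} (key : α → Int) (xs : List α) :
    PySem.List.max? xs key = xs.foldl (maxStep key) none := rfl

-- A's branched dict update is the unconditional counting insert
theorem branch_insert_eq (d : PySem.Dict Int Int) (x : Int) :
    ((if d.contains x = false then d.insert x 1
      else d.insert x (d.getD x 0 + 1)) : PySem.Dict Int Int)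
      = d.insert x (d.getD x 0 + 1) := by
  by_cases h : d.contains x = false
  · rw [if_pos h, PySem.Dict.getD_of_not_contains d 0 h]; norm_num
  · rw [if_neg h]

-- the max?-fold ignores any element already dominated by the accumulator
theorem maxStep_absorb {α : Type} (key : α → Int) (m : α) (y : α) (h : key y ≤ key m) :
    maxStep key (some m) y = some m := by
  simp [maxStep, not_lt.mpr h]

-- the set fold only appends: s is a prefix of Set.update s xs
theorem set_update_prefix {α : Type} [BEq α] (xs : List α) (s : PySem.Set α) :
    s <+: PySem.Set.update s xs := by
  induction xs generalizing s with
  | nil => exact List.prefix_rfl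
  | cons x xs ih =>
      refine List.IsPrefix.trans ?_ (ih (PySem.Set.add s x))
      unfold PySem.Set.add
      split
      · exact List.prefix_rfl
      · exact ⟨[x], rfl⟩

-- core: folding the max? step over the first-occurrence dedup of xs past a dominated
-- seen-set s equals folding it over xs itself
theorem max_fold_dedup {α : Type} [BEq α] [LawfulBEq α] (key : α → Int) (xs : List α)
    (s : PySem.Set α) (acc : Option α)
    (hdom : ∀ y ∈ s, ∃ m, acc = some m ∧ key y ≤ key m) :
    ((PySem.Set.update s xs).drop s.length).foldl (maxStep key) acc
      = xs.foldl (maxStep key) acc := by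
  induction xs generalizing s acc with
  | nil =>
      simp [PySem.Set.update]
  | cons x xs ih =>
      by_cases hmem : s.contains x = true
      · have hadd : PySem.Set.add s x = s := by unfold PySem.Set.add; rw [if_pos hmem]
        have hx : x ∈ s := by simpa [PySem.Set.contains] using hmem
        obtain ⟨m, hm, hle⟩ := hdom x hx
        have hupd : PySem.Set.update s (x :: xs) = PySem.Set.update s xs := by
          simp [PySem.Set.update, hadd]
        have hstep : maxStep key acc x = acc := by
          rw [hm]; exact maxStep_absorb key m x hle
        rw [hupd, ih s acc hdom, List.foldl_cons, hstep]
      · have hadd : PySem.Set.add s x = s ++ [x] := by unfold PySem.Set.add; rw [if_neg hmem]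
        have hupd : PySem.Set.update s (x :: xs) = PySem.Set.update (s ++ [x]) xs := by
          simp [PySem.Set.update, hadd]
        have hdom' : ∀ y ∈ s ++ [x], ∃ m, maxStep key acc x = some m ∧ key y ≤ key m := by
          intro y hy
          rcases List.mem_append.mp hy with hy | hy
          · obtain ⟨m, hm, hle⟩ := hdom y hy
            rw [hm]
            by_cases hlt : key m < key x
            · exact ⟨x, by simp [maxStep, hlt], le_of_lt (lt_of_le_of_lt hle hlt)⟩
            · exact ⟨m, by simp [maxStep, hlt], hle⟩
          · have hyx : y = x := by simpa using hy
            subst hyx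
            cases hacc : acc with
            | none => exact ⟨y, by simp [maxStep], le_refl _⟩
            | some m =>
                by_cases hlt : key m < key y
                · exact ⟨y, by simp [maxStep, hlt], le_refl _⟩
                · exact ⟨m, by simp [maxStep, hlt], not_lt.mp hlt⟩
        obtain ⟨t, ht⟩ := set_update_prefix xs (s ++ [x])
        have hdrop : (PySem.Set.update (s ++ [x]) xs).drop s.length = x :: t := by
          rw [← ht, List.drop_append_of_le_length (by simp)]
          simp
        have hdrop' : (PySem.Set.update (s ++ [x]) xs).drop (s ++ [x]).length = t := by
          rw [← ht]; simp
        have hih := ih (s ++ [x]) (maxStep key acc x) hdom'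
        rw [hdrop'] at hih
        rw [hupd, hdrop, List.foldl_cons, List.foldl_cons, hih]

-- max(set-of-first-occurrences, key) = max(list, key): a duplicate never wins the strict argmax
theorem max?_ofList_eq {α : Type} [BEq α] [LawfulBEq α] (key : α → Int) (xs : List α) :
    PySem.List.max? (PySem.Set.ofList xs) key = PySem.List.max? xs key := by
  have h := max_fold_dedup key xs PySem.Set.empty none (by intro y hy; cases hy)
  simpa [max?_eq_foldl_maxStep, PySem.Set.ofList, PySem.Set.update, PySem.Set.empty] using h

-- one side of A (a 1-D counting loop + dict argmax) agrees with max(list, key=count)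
theorem side_eq (m : List Int) :
    (PySem.List.max?
        (PySem.Dict.keys (m.foldl (fun (d : PySem.Dict Int Int) x => d.insert x (d.getD x 0 + 1)) PySem.Dict.empty))
        (fun k => (m.foldl (fun (d : PySem.Dict Int Int) x => d.insert x (d.getD x 0 + 1)) PySem.Dict.empty).getD k 0))
      = PySem.List.max? m (fun r => (m.count r : Int)) := by
  have hkey : (fun k => (m.foldl (fun (d : PySem.Dict Int Int) x => d.insert x (d.getD x 0 + 1))
      PySem.Dict.empty).getD k 0) = fun r => ((m.count r : Nat) : Int) := by
    funext k
    rw [PySem.Dict.getD_foldl_insert_add_one m PySem.Dict.empty k]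
    simp
  have hkeys : (m.foldl (fun (d : PySem.Dict Int Int) x => d.insert x (d.getD x 0 + 1))
      PySem.Dict.empty).keys = PySem.Set.ofList m := by
    rw [PySem.Dict.keys_foldl_insert m (fun d x => d.getD x 0 + 1) PySem.Dict.empty]
    rfl
  calc _ = PySem.List.max? (PySem.Set.ofList m) (fun r => (m.count r : Int)) := by
        rw [← hkeys, ← hkey]
       _ = _ := max?_ofList_eq _ m

-- dedup seeded past a fresh head: ofList (v :: t) = v :: ofList (t with v filtered out)
theorem set_update_cons (v : Int) (t s : List Int) :
    PySem.Set.update (v :: s) t = v :: PySem.Set.update s (t.filter (· != v)) := by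
  induction t generalizing s with
  | nil => simp [PySem.Set.update]
  | cons x t ih =>
      by_cases hx : x = v
      · subst hx
        have hadd : PySem.Set.add (x :: s) x = x :: s := by
          unfold PySem.Set.add
          rw [if_pos (by simp [PySem.Set.contains])]
        calc PySem.Set.update (x :: s) (x :: t)
            = PySem.Set.update (x :: s) t := by
              simp only [PySem.Set.update, List.foldl_cons, hadd]
          _ = x :: PySem.Set.update s (t.filter (· != x)) := ih s
          _ = x :: PySem.Set.update s ((x :: t).filter (· != x)) := by
              rw [List.filter_cons, if_neg (by simp)]
      · have hne : (x != v) = true := by simp [hx]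
        have hadd : PySem.Set.add (v :: s) x = v :: PySem.Set.add s x := by
          unfold PySem.Set.add
          by_cases hc : PySem.Set.contains s x = true
          · rw [if_pos (by simp [PySem.Set.contains] at hc ⊢; exact Or.inr hc), if_pos hc]
          · rw [if_neg ?_, if_neg hc]
            · rfl
            · simp [PySem.Set.contains] at hc ⊢
              exact ⟨fun h => hx (by simpa using h), hc⟩
        simp only [PySem.Set.update, List.foldl_cons] at *
        rw [hadd, ih (PySem.Set.add s x), List.filter_cons, if_pos hne]
        rfl

theorem ofList_cons (v : Int) (t : List Int) :
    PySem.Set.ofList (v :: t) = v :: PySem.Set.ofList (t.filter (· != v)) := by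
  have h := set_update_cons v t []
  simpa [PySem.Set.ofList, PySem.Set.update, PySem.Set.empty, PySem.Set.add,
    PySem.Set.contains] using h

-- maxStep from a present accumulator is the total fold with combine
theorem foldl_maxStep_some {α : Type} (key : α → Int) (ds : List α) (v : α) :
    ds.foldl (maxStep key) (some v) = some (ds.foldl (combine key) v) := by
  induction ds generalizing v with
  | nil => rfl
  | cons d ds ih =>
      simp only [List.foldl_cons]
      have : maxStep key (some v) d = some (combine key v d) := by
        by_cases h : key v < key d <;> simp [maxStep, combine, h]
      rw [this, ih]

-- the loop's (best, count) pair folds like combine when the count component is the key of the best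
theorem foldl_step_pair (key : Int → Int) (ds : List Int) (b : Int) :
    ds.foldl (fun (p : Int × Int) x => if p.2 < key x then (x, key x) else p) (b, key b)
      = (ds.foldl (combine key) b, key (ds.foldl (combine key) b)) := by
  induction ds generalizing b with
  | nil => rfl
  | cons d ds ih =>
      simp only [List.foldl_cons]
      by_cases h : key b < key d
      · rw [if_pos h, show combine key b d = d from by simp [combine, h], ih]
      · rw [if_neg h, show combine key b d = b from by simp [combine, h], ih]

-- the pair fold only applies the key to list elements
theorem foldl_step_congr (k k' : Int → Int) (ds : List Int)
    (h : ∀ x ∈ ds, k x = k' x) (a : Int × Int) :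
    ds.foldl (fun (p : Int × Int) x => if p.2 < k x then (x, k x) else p) a
      = ds.foldl (fun (p : Int × Int) x => if p.2 < k' x then (x, k' x) else p) a := by
  induction ds generalizing a with
  | nil => rfl
  | cons d ds ih =>
      simp only [List.foldl_cons]
      rw [h d (by simp), ih (fun x hx => h x (by simp [hx]))]

-- count survives filtering by a different value
theorem count_filter_ne (t : List Int) (v x : Int) (hx : x ≠ v) :
    (t.filter (· != v)).count x = t.count x := by
  induction t with
  | nil => rfl
  | cons y t ih =>
      rw [List.filter_cons]
      by_cases hy : (y != v) = true
      · rw [if_pos hy]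
        simp only [List.count_cons, ih]
      · rw [if_neg hy]
        have hyv : y = v := by simpa using hy
        subst hyv
        rw [List.count_cons_of_ne (fun h => hx h.symm), ih]

-- the while loop computes the pair fold over the distinct values of rest, keyed by counts in rest
theorem modeLoop_spec (r : List Int) (best bc : Int) :
    modeLoop best bc r
      = ((PySem.Set.ofList r).foldl
          (fun (p : Int × Int) x => if p.2 < (r.count x : Int) then (x, (r.count x : Int)) else p)
          (best, bc)).1 := by
  induction hn : r.length using Nat.strong_induction_on generalizing r best bc with
  | _ n ih =>
    match r with
    | [] => simp [modeLoop, PySem.Set.ofList]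
    | v :: t =>
        have hfil : (v :: t).filter (· != v) = t.filter (· != v) := by
          rw [List.filter_cons, if_neg (by simp)]
        have hlen : (t.filter (· != v)).length < n := by
          subst hn
          exact Nat.lt_succ_of_le (List.length_filter_le _ _)
        have hrw := ih _ hlen (t.filter (· != v))
          (if bc < ((v :: t).count v : Int) then (v, ((v :: t).count v : Int)) else (best, bc)).1
          (if bc < ((v :: t).count v : Int) then (v, ((v :: t).count v : Int)) else (best, bc)).2
          rfl
        rw [modeLoop, hfil, hrw]
        -- align the key: counts in the filtered rest = counts in rest on its members
        rw [foldl_step_congr (fun x => ((t.filter (· != v)).count x : Int))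
              (fun x => ((v :: t).count x : Int)) _ ?_ _]
        · rw [ofList_cons v t, List.foldl_cons]
        · intro x hx
          have hxmem : x ∈ t.filter (· != v) := (PySem.Set.mem_ofList _ x).mp hx
          have hxv : x ≠ v := by
            have := List.of_mem_filter hxmem
            simpa using this
          simp only []
          rw [count_filter_ne t v x hxv, List.count_cons_of_ne (Ne.symm hxv)]

-- _mode computes Python's max(xs, key=xs.count) (first strict argmax)
theorem pyMode_eq_max? (m : List Int) (hm : m ≠ []) :
    PySem.List.max? m (fun r => (m.count r : Int)) = some (pyMode m) := by
  match m with
  | v :: t =>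
      have hfil : (v :: t).filter (· != v) = t.filter (· != v) := by
        rw [List.filter_cons, if_neg (by simp)]
      rw [pyMode, hfil, modeLoop_spec]
      -- key congruence on the filtered tail: counts in rest = counts in m
      rw [foldl_step_congr (fun x => ((t.filter (· != v)).count x : Int))
            (fun x => (((v :: t).count x : Nat) : Int)) _ ?_ _]
      · rw [show ((((v :: t).count v : Nat) : Int)) = (fun x => (((v :: t).count x : Nat) : Int)) v from rfl,
           foldl_step_pair]
        rw [← max?_ofList_eq (fun r => ((v :: t).count r : Int)) (v :: t), ofList_cons,
           max?_eq_foldl_maxStep, List.foldl_cons]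
        show _ = some _
        rw [show maxStep (fun r => (((v :: t).count r : Nat) : Int)) none v = some v from rfl,
           foldl_maxStep_some]
      · intro x hx
        have hxmem : x ∈ t.filter (· != v) := (PySem.Set.mem_ofList _ x).mp hx
        have hxv : x ≠ v := by
          have := List.of_mem_filter hxmem
          simpa using this
        simp only []
        rw [count_filter_ne t v x hxv, List.count_cons_of_ne (Ne.symm hxv)]

-- ===== VERDICT (by name: the statement is the Claim_ definition above) =====
theorem find_pos_from_adj_cells_spec : Claim_equal_find_pos_from_adj_cells := by
  intro adj_cells _ hpre
  unfold Spec_find_pos_from_adj_cells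
  simp only [find_pos_from_adj_cells, find_pos_from_adj_cells_alt, branch_insert_eq]
  rw [show List.foldl
        (fun (st : PySem.Dict Int Int × PySem.Dict Int Int) (pos : Int × Int) =>
          (st.1.insert pos.1 (st.1.getD pos.1 0 + 1), st.2.insert pos.2 (st.2.getD pos.2 0 + 1)))
        (PySem.Dict.empty, PySem.Dict.empty) adj_cells
      = (adj_cells.foldl
           (fun (d : PySem.Dict Int Int) (pos : Int × Int) => d.insert pos.1 (d.getD pos.1 0 + 1)) PySem.Dict.empty,
         adj_cells.foldl
           (fun (d : PySem.Dict Int Int) (pos : Int × Int) => d.insert pos.2 (d.getD pos.2 0 + 1)) PySem.Dict.empty)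
      from PySem.List.foldl_prod_mk
        (fun (d : PySem.Dict Int Int) (pos : Int × Int) => d.insert pos.1 (d.getD pos.1 0 + 1))
        (fun (d : PySem.Dict Int Int) (pos : Int × Int) => d.insert pos.2 (d.getD pos.2 0 + 1))
        adj_cells PySem.Dict.empty PySem.Dict.empty]
  dsimp only
  rw [show adj_cells.foldl
        (fun (d : PySem.Dict Int Int) (pos : Int × Int) => d.insert pos.1 (d.getD pos.1 0 + 1)) PySem.Dict.empty
      = (adj_cells.map (fun p => p.1)).foldl
        (fun (d : PySem.Dict Int Int) x => d.insert x (d.getD x 0 + 1)) PySem.Dict.empty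
      from by rw [List.foldl_map]]
  rw [show adj_cells.foldl
        (fun (d : PySem.Dict Int Int) (pos : Int × Int) => d.insert pos.2 (d.getD pos.2 0 + 1)) PySem.Dict.empty
      = (adj_cells.map (fun p => p.2)).foldl
        (fun (d : PySem.Dict Int Int) x => d.insert x (d.getD x 0 + 1)) PySem.Dict.empty
      from by rw [List.foldl_map]]
  rw [side_eq (adj_cells.map (fun p => p.1)), side_eq (adj_cells.map (fun p => p.2))]
  rw [pyMode_eq_max? (adj_cells.map (fun p => p.1)) (by simpa using hpre),
      pyMode_eq_max? (adj_cells.map (fun p => p.2)) (by simpa using hpre)]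
  rfl
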